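-- pv_equiv track=rewrite | github.com/paiml/depyler | examples/hard_perfect_numbers.py | count_perfect_in_range
-- ===== SOURCE A (Python) =====
-- def sum_of_divisors(n: int) -> int:
--     """Compute the sum of proper divisors of n."""
--     if n <= 1:
--         return 0
--     total: int = 1
--     i: int = 2
--     while i * i <= n:
--         if n % i == 0:
--             total = total + i
--             other: int = n // i
--             if other != i:
--                 total = total + other
--         i = i + 1
--     return total
--
-- def classify_number(n: int) -> int:
--     """Classify number: -1=deficient, 0=perfect, 1=abundant."""
--     if n <= 1:
--         return -1
--     s: int = sum_of_divisors(n)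
--     if s == n:
--         return 0
--     elif s > n:
--         return 1
--     return -1
--
-- def count_perfect_in_range(low: int, high: int) -> int:
--     """Count perfect numbers in range [low, high]."""
--     count: int = 0
--     current: int = low
--     while current <= high:
--         if classify_number(current) == 0:
--             count = count + 1
--         current = current + 1
--     return count
-- ===== SOURCE B (Python) =====
-- def count_perfect_in_range(low: int, high: int) -> int:
--     """Count perfect numbers in range [low, high]."""
--     if high < 2 or low > high:
--         return 0
--     sig = [0] * (high + 1)
--     for d in range(1, high + 1):
--         for m in range(2 * d, high + 1, d):
--             sig[m] += d
--     count = 0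
--     for n in range(max(low, 2), high + 1):
--         if sig[n] == n:
--             count += 1
--     return count
-- ===== Notes on version B (the rewrite author's own statement) =====
-- stated objective: alternative
-- what changed: Replaced the per-number trial-division (sum proper divisors by scanning i up to sqrt(n) for every n in [low,high]) with a single divisor-sum sieve over [0,high] followed by one linear counting pass.
import Mathlib
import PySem

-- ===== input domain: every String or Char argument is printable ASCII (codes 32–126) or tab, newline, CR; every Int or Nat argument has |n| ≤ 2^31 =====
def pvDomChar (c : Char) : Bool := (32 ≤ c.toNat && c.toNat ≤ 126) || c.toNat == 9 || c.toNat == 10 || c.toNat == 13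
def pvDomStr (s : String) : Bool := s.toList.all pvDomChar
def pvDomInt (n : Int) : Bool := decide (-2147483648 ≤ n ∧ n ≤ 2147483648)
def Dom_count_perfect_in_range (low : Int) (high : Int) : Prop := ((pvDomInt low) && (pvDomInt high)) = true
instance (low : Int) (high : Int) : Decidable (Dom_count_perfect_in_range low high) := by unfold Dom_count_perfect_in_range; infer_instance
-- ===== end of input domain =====

-- B replaces A's per-number sqrt(n) trial-division scans by one divisor-sum sieve over [0, high]
-- plus a single counting pass (objective: alternative algorithm, same exact result).

-- ===== PORT A =====
-- while i * i <= n: if n % i == 0: total += i; other = n // i; if other != i: total += other; i += 1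
def sodLoop (n : Int) (i : Int) (total : Int) : Int :=
  if _h : i * i ≤ n then
    sodLoop n (i + 1)
      (if PySem.Int.mod n i = 0 then
        total + i +
          (if PySem.Int.floordiv n i ≠ i then PySem.Int.floordiv n i else 0)
      else total)
  else total
termination_by (n + 1 - i).toNat
decreasing_by
  have hi : i ≤ n := by nlinarith [sq_nonneg i, sq_nonneg (i - 1)]
  omega

def sum_of_divisors (n : Int) : Int :=
  if n ≤ 1 then 0 else sodLoop n 2 1

def classify_number (n : Int) : Int :=
  if n ≤ 1 then -1
  else
    let s := sum_of_divisors n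
    if s = n then 0 else if s > n then 1 else -1

-- while current <= high: if classify_number(current) == 0: count += 1; current += 1
def cpirLoop (high : Int) (current : Int) (count : Int) : Int :=
  if current ≤ high then
    cpirLoop high (current + 1) (if classify_number current = 0 then count + 1 else count)
  else count
termination_by (high + 1 - current).toNat
decreasing_by omega

def count_perfect_in_range (low : Int) (high : Int) : Int :=
  cpirLoop high low 0

-- ===== PORT B =====
-- sig = [0]*(high+1); for d in range(1, high+1): for m in range(2*d, high+1, d): sig[m] += d
-- then count n in range(max(low,2), high+1) with sig[n] == n.
-- Indices m, n of these ranges satisfy 0 ≤ m,n ≤ high < len(sig), so Python's sig[m]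
-- is exactly List.getD m.toNat / List.set m.toNat here.
def count_perfect_in_range_alt (low : Int) (high : Int) : Int :=
  if high < 2 ∨ low > high then 0
  else
    let sig0 : List Int := List.replicate (high + 1).toNat 0
    let sig := (PySem.List.pyRange 1 (high + 1) 1).foldl
      (fun s d => (PySem.List.pyRange (2 * d) (high + 1) d).foldl
        (fun s m => s.set m.toNat (s.getD m.toNat 0 + d)) s) sig0
    (PySem.List.pyRange (max low 2) (high + 1) 1).foldl
      (fun c n => if sig.getD n.toNat 0 = n then c + 1 else c) 0

-- ===== PRECONDITION & SPEC =====
def Spec_count_perfect_in_range (low : Int) (high : Int) (out : Int) : Prop := out = count_perfect_in_range_alt low high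
instance (low : Int) (high : Int) (out : Int) : Decidable (Spec_count_perfect_in_range low high out) := by unfold Spec_count_perfect_in_range; infer_instance

-- ===== CLAIM (what is proved, stated in full; the proofs are below) =====
def Claim_equal_count_perfect_in_range : Prop := ∀ (low : Int) (high : Int), Dom_count_perfect_in_range low high → Spec_count_perfect_in_range low high (count_perfect_in_range low high)

-- ===== LEMMAS AND PROOFS =====

-- sum of proper divisors of n (reference value both programs compute)
noncomputable def spdZ (n : Int) : Int := ∑ d ∈ Finset.Icc 1 (n - 1), if d ∣ n then d else 0

-- contributions A's loop has not yet collected when the loop counter reaches i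
noncomputable def sodRem (n : Int) (i : Int) : Int :=
  ∑ d ∈ Finset.Icc 1 (n - 1), if d ∣ n ∧ i ≤ min d (n / d) then d else 0

theorem icc_bot {a b : Int} (h : a ≤ b) :
    Finset.Icc a b = insert a (Finset.Icc (a + 1) b) := by
  ext x; simp [Finset.mem_Icc]; omega

theorem dvd_div_ge_two {n d : Int} (hd : d ∣ n) (h1 : 1 ≤ d) (hlt : d < n) :
    2 ≤ n / d ∧ d * (n / d) = n := by
  obtain ⟨q, rfl⟩ := hd
  have hd0 : d ≠ 0 := by omega
  rw [Int.mul_ediv_cancel_left q hd0]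
  have hq : 1 ≤ q := by nlinarith
  refine ⟨?_, by ring⟩
  rcases lt_or_ge 1 q with h | h
  · omega
  · exfalso; have : q = 1 := by omega
    subst this; omega

theorem sodRem_step {n i : Int} (_hn : 2 ≤ n) (hi : 2 ≤ i) (hsq : i * i ≤ n) :
    sodRem n i = sodRem n (i + 1) + (if i ∣ n then i + (if n / i ≠ i then n / i else 0) else 0) := by
  unfold sodRem
  have split : ∀ d ∈ Finset.Icc 1 (n - 1),
      (if d ∣ n ∧ i ≤ min d (n / d) then d else 0)
        = (if d ∣ n ∧ i + 1 ≤ min d (n / d) then d else 0)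
          + (if d ∣ n ∧ min d (n / d) = i then d else 0) := by
    intro d _; split_ifs <;> omega
  rw [Finset.sum_congr rfl split, Finset.sum_add_distrib]
  congr 1
  -- the residual sum equals the loop body's contribution at i
  by_cases hdvd : i ∣ n
  · have hin : i < n := by nlinarith
    have hmul : i * (n / i) = n := Int.mul_ediv_cancel' hdvd
    have hq : i ≤ n / i := by nlinarith
    have hi0 : i ≠ 0 := by omega
    by_cases heq : n / i = i
    · rw [if_pos hdvd, if_neg (show ¬ n / i ≠ i by simpa using heq), add_zero]
      refine (Finset.sum_eq_single_of_mem i (by rw [Finset.mem_Icc]; omega) ?_).trans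
        (by rw [heq]; simp [hdvd])
      intro d hdm hne
      rw [Finset.mem_Icc] at hdm
      rw [if_neg]
      rintro ⟨hd, hm⟩
      have hmuld : d * (n / d) = n := Int.mul_ediv_cancel' hd
      rcases min_eq_iff.mp hm with ⟨h, _⟩ | ⟨h, _⟩
      · omega
      · rw [h] at hmuld
        rw [heq] at hmul
        exact hne (mul_right_cancel₀ hi0 (hmuld.trans hmul.symm))
    · have hlt : i < n / i := lt_of_le_of_ne hq (fun h => heq h.symm)
      have hqdvd : (n / i) ∣ n := Int.ediv_dvd_of_dvd hdvd
      have hq0 : n / i ≠ 0 := by omega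
      have hcof : n / (n / i) = i := by
        calc n / (n / i) = (i * (n / i)) / (n / i) := by rw [hmul]
        _ = i := Int.mul_ediv_cancel i hq0
      rw [if_pos hdvd, if_pos heq]
      rw [Finset.sum_eq_add_of_mem i (n / i)
        (by rw [Finset.mem_Icc]; omega)
        (by rw [Finset.mem_Icc]; constructor
            · omega
            · nlinarith)
        (by omega) ?big]
      · rw [if_pos ⟨hdvd, by rw [min_eq_left hq]⟩,
            if_pos ⟨hqdvd, by rw [hcof, min_eq_right (by omega)]⟩]
      case big =>
        intro d hdm hne
        obtain ⟨hne1, hne2⟩ := hne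
        rw [Finset.mem_Icc] at hdm
        rw [if_neg]
        rintro ⟨hd, hm⟩
        have hmuld : d * (n / d) = n := Int.mul_ediv_cancel' hd
        rcases min_eq_iff.mp hm with ⟨h, _⟩ | ⟨h, _⟩
        · exact hne1 (by omega)
        · apply hne2
          rw [h] at hmuld
          have h2 : (n / i) * i = n := by rw [mul_comm]; exact hmul
          have h3 : d * i = (n / i) * i := by rw [hmuld, h2]
          exact mul_right_cancel₀ hi0 h3
  · rw [if_neg hdvd]
    refine Finset.sum_eq_zero ?_
    intro d hdm
    rw [Finset.mem_Icc] at hdm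
    rw [if_neg]
    rintro ⟨hd, hm⟩
    have hmuld : d * (n / d) = n := Int.mul_ediv_cancel' hd
    rcases min_eq_iff.mp hm with ⟨h, _⟩ | ⟨h, _⟩
    · exact hdvd (by rw [h] at hd; exact hd)
    · exact hdvd ⟨d, by rw [← hmuld, h]; ring⟩

theorem sodRem_done {n i : Int} (_hn : 2 ≤ n) (hi : 2 ≤ i) (hsq : ¬ i * i ≤ n) :
    sodRem n i = 0 := by
  unfold sodRem
  refine Finset.sum_eq_zero ?_
  intro d hdm
  rw [Finset.mem_Icc] at hdm
  rw [if_neg]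
  rintro ⟨hdvd, hmin⟩
  have h1 : i ≤ d := le_trans hmin (min_le_left _ _)
  have h2 : i ≤ n / d := le_trans hmin (min_le_right _ _)
  have hmul : d * (n / d) = n := Int.mul_ediv_cancel' hdvd
  nlinarith

theorem sodLoop_eq {n : Int} (hn : 2 ≤ n) :
    ∀ (k : Nat) (i t : Int), 2 ≤ i → (n + 1 - i).toNat = k →
      sodLoop n i t = t + sodRem n i := by
  intro k
  induction k using Nat.strong_induction_on with
  | _ k IH =>
    intro i t hi hk
    rw [sodLoop]
    by_cases hsq : i * i ≤ n
    · rw [dif_pos hsq]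
      have hin : i ≤ n := by nlinarith
      rw [IH (k - 1) (by omega) (i + 1) _ (by omega) (by omega)]
      rw [sodRem_step hn hi hsq]
      have hmod := PySem.Int.mod_eq_zero_iff_dvd n i
      rw [PySem.Int.floordiv_eq_ediv_of_pos (by omega : (0:Int) < i)]
      by_cases hdvd : i ∣ n
      · rw [if_pos (hmod.mpr hdvd), if_pos hdvd]
        split_ifs <;> ring
      · rw [if_neg (fun h => hdvd (hmod.mp h)), if_neg hdvd]
        ring
    · rw [dif_neg hsq, sodRem_done hn hi hsq]
      ring

theorem spdZ_eq {n : Int} (hn : 2 ≤ n) : spdZ n = 1 + sodRem n 2 := by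
  unfold spdZ sodRem
  have key : ∀ d ∈ Finset.Icc 1 (n - 1),
      (if d ∣ n then d else 0)
        = (if d = 1 then 1 else 0) + (if d ∣ n ∧ 2 ≤ min d (n / d) then d else 0) := by
    intro d hdm
    rw [Finset.mem_Icc] at hdm
    by_cases h1 : d = 1
    · subst h1
      have hdvd : (1:Int) ∣ n := one_dvd n
      rw [if_pos hdvd, if_pos rfl, if_neg]
      · norm_num
      · rintro ⟨-, hm⟩
        rw [Int.ediv_one, min_eq_left (by omega)] at hm
        omega
    · by_cases hd : d ∣ n
      · obtain ⟨h2, hmul⟩ := dvd_div_ge_two hd (by omega) (by omega)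
        rw [if_pos hd, if_neg h1, if_pos ⟨hd, le_min (by omega) h2⟩]
        ring
      · rw [if_neg hd, if_neg h1, if_neg (by tauto)]
        ring
  rw [Finset.sum_congr rfl key, Finset.sum_add_distrib]
  congr 1
  rw [Finset.sum_eq_single_of_mem 1 (by rw [Finset.mem_Icc]; omega)
    (by intro d _ hne; rw [if_neg hne]), if_pos rfl]

theorem sum_of_divisors_eq {n : Int} (hn : 2 ≤ n) : sum_of_divisors n = spdZ n := by
  unfold sum_of_divisors
  rw [if_neg (by omega), sodLoop_eq hn (n + 1 - 2).toNat 2 1 (by omega) rfl, spdZ_eq hn]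

theorem classify_zero_iff (n : Int) : classify_number n = 0 ↔ 2 ≤ n ∧ spdZ n = n := by
  unfold classify_number
  by_cases h1 : n ≤ 1
  · rw [if_pos h1]
    constructor
    · intro h; exact absurd h (by norm_num)
    · intro h; omega
  · rw [if_neg h1]
    have hs := sum_of_divisors_eq (show (2:Int) ≤ n by omega)
    simp only [hs]
    split_ifs with h2 h3
    · simp [h2]; omega
    · simp; omega
    · simp; omega

theorem pyRange_one_nil {a b : Int} (h : b ≤ a) : PySem.List.pyRange a b 1 = [] := by
  rw [PySem.List.pyRange_of_pos a b (by norm_num)]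
  simp [show ¬ a < b by omega]

theorem cpirLoop_eq (high : Int) :
    ∀ (k : Nat) (c t : Int), (high + 1 - c).toNat = k →
      cpirLoop high c t = t + ∑ m ∈ Finset.Icc c high, (if classify_number m = 0 then 1 else 0) := by
  intro k
  induction k with
  | zero =>
    intro c t hk
    rw [cpirLoop, if_neg (by omega), Finset.Icc_eq_empty (by omega)]
    simp
  | succ k IH =>
    intro c t hk
    have hc : c ≤ high := by omega
    rw [cpirLoop, if_pos hc, IH (c + 1) _ (by omega), icc_bot hc,
      Finset.sum_insert (by rw [Finset.mem_Icc]; omega)]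
    split_ifs <;> ring

theorem foldl_ite_count (p : Int → Prop) [DecidablePred p] (b : Int) :
    ∀ (k : Nat) (a c : Int), (b + 1 - a).toNat = k →
      (PySem.List.pyRange a (b + 1) 1).foldl (fun k n => if p n then k + 1 else k) c
        = c + ∑ m ∈ Finset.Icc a b, (if p m then 1 else 0) := by
  intro k
  induction k with
  | zero =>
    intro a c hk
    rw [pyRange_one_nil (by omega), Finset.Icc_eq_empty (by omega)]
    simp
  | succ k IH =>
    intro a c hk
    have ha : a ≤ b := by omega
    rw [PySem.List.pyRange_one_cons (by omega : a < b + 1), List.foldl_cons,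
      IH (a + 1) _ (by omega), icc_bot ha,
      Finset.sum_insert (by rw [Finset.mem_Icc]; omega)]
    split_ifs <;> ring

theorem sum_map_pyRange (f : Int → Int) (b : Int) :
    ∀ (k : Nat) (a : Int), (b + 1 - a).toNat = k →
      ((PySem.List.pyRange a (b + 1) 1).map f).sum = ∑ d ∈ Finset.Icc a b, f d := by
  intro k
  induction k with
  | zero =>
    intro a hk
    rw [pyRange_one_nil (by omega), Finset.Icc_eq_empty (by omega)]
    simp
  | succ k IH =>
    intro a hk
    have ha : a ≤ b := by omega
    rw [PySem.List.pyRange_one_cons (by omega : a < b + 1), List.map_cons, List.sum_cons,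
      IH (a + 1) (by omega), icc_bot ha,
      Finset.sum_insert (by rw [Finset.mem_Icc]; omega)]

theorem foldl_set_length (d : Int) (L : List Int) (s : List Int) :
    (L.foldl (fun s m => s.set m.toNat (s.getD m.toNat 0 + d)) s).length = s.length := by
  induction L generalizing s with
  | nil => rfl
  | cons m L ih => rw [List.foldl_cons, ih, List.length_set]

theorem foldl_set_getD (d : Int) (L : List Int) :
    ∀ (s : List Int) (j : Nat), j < s.length →
      (L.foldl (fun s m => s.set m.toNat (s.getD m.toNat 0 + d)) s).getD j 0
        = s.getD j 0 + d * (L.countP (fun m => m.toNat == j) : Int) := by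
  induction L with
  | nil => intro s j hj; simp
  | cons m L ih =>
    intro s j hj
    rw [List.foldl_cons, List.countP_cons]
    by_cases hm : m.toNat = j
    · subst hm
      have h1 : (s.set m.toNat (s.getD m.toNat 0 + d)).getD m.toNat 0
          = s.getD m.toNat 0 + d := by
        simp [List.getD, hj]
      rw [ih _ m.toNat (by simpa using hj), h1]
      simp only [beq_self_eq_true, if_pos]
      push_cast
      ring
    · have h1 : (s.set m.toNat (s.getD m.toNat 0 + d)).getD j 0 = s.getD j 0 := by
        simp [List.getD, List.getElem?_set_ne hm]
      rw [ih _ j (by simpa using hj), h1]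
      simp only [beq_iff_eq, hm, ite_false]
      norm_num

theorem countP_toNat_pyRange {d hi n : Int} (hd : 1 ≤ d) (hn : 0 ≤ n) :
    ((PySem.List.pyRange (2 * d) (hi + 1) d).countP (fun m => m.toNat == n.toNat) : Int)
      = if d ∣ n ∧ 2 * d ≤ n ∧ n ≤ hi then 1 else 0 := by
  have hd0 : (0:Int) < d := by omega
  have h2d : d ∣ 2 * d := ⟨2, by ring⟩
  have hdvd_iff : d ∣ n - 2 * d ↔ d ∣ n := by
    constructor
    · intro h; have := dvd_add h h2d; simpa using this
    · intro h; exact dvd_sub h h2d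
  have hmem : n ∈ PySem.List.pyRange (2 * d) (hi + 1) d ↔ (d ∣ n ∧ 2 * d ≤ n ∧ n ≤ hi) := by
    rw [PySem.List.mem_pyRange_iff_of_pos hd0, hdvd_iff]
    constructor
    · rintro ⟨h1, h2, h3⟩; exact ⟨h3, h1, by omega⟩
    · rintro ⟨h1, h2, h3⟩; exact ⟨h2, by omega, h1⟩
  have hcongr : (PySem.List.pyRange (2 * d) (hi + 1) d).countP (fun m => m.toNat == n.toNat)
      = (PySem.List.pyRange (2 * d) (hi + 1) d).countP (fun m => m == n) := by
    apply List.countP_congr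
    intro m hm
    have h2 : 2 * d ≤ m := ((PySem.List.mem_pyRange_iff_of_pos hd0 m).mp hm).1
    simp only [beq_iff_eq]
    constructor
    · intro h; omega
    · intro h; omega
  have hnodup : (PySem.List.pyRange (2 * d) (hi + 1) d).Nodup := by
    rw [PySem.List.pyRange_of_pos _ _ hd0]
    refine List.Nodup.map ?_ (List.nodup_range)
    intro k1 k2 h
    have : d * (k1:Int) = d * (k2:Int) := by linarith
    have := mul_left_cancel₀ (by omega : d ≠ 0) this
    exact_mod_cast this
  rw [hcongr]
  by_cases hm : n ∈ PySem.List.pyRange (2 * d) (hi + 1) d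
  · rw [if_pos (hmem.mp hm)]
    have : (PySem.List.pyRange (2 * d) (hi + 1) d).count n = 1 :=
      List.count_eq_one_of_mem hnodup hm
    rw [← List.count_eq_countP, this]
    norm_num
  · rw [if_neg (fun h => hm (hmem.mpr h))]
    have : (PySem.List.pyRange (2 * d) (hi + 1) d).count n = 0 :=
      List.count_eq_zero_of_not_mem hm
    rw [← List.count_eq_countP, this]
    norm_num

theorem sieve_outer (hi n : Int) (hn : 2 ≤ n) (hn2 : n ≤ hi) :
    ∀ (D : List Int) (s : List Int), (∀ d ∈ D, 1 ≤ d) → s.length = (hi + 1).toNat →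
      (D.foldl (fun s d => (PySem.List.pyRange (2 * d) (hi + 1) d).foldl
          (fun s m => s.set m.toNat (s.getD m.toNat 0 + d)) s) s).getD n.toNat 0
        = s.getD n.toNat 0 + (D.map (fun d => if d ∣ n ∧ 2 * d ≤ n then d else 0)).sum := by
  intro D
  induction D with
  | nil => intro s _ _; simp
  | cons d D ih =>
    intro s hD hs
    rw [List.foldl_cons, List.map_cons, List.sum_cons]
    have hd1 : 1 ≤ d := hD d (by simp)
    have hjlen : n.toNat < s.length := by rw [hs]; omega
    rw [ih _ (fun d' hd' => hD d' (by simp [hd'])) (by rw [foldl_set_length]; exact hs)]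
    rw [foldl_set_getD d _ s n.toNat hjlen]
    rw [countP_toNat_pyRange hd1 (by omega)]
    have hcollapse : (if d ∣ n ∧ 2 * d ≤ n ∧ n ≤ hi then (1:Int) else 0)
        = (if d ∣ n ∧ 2 * d ≤ n then (1:Int) else 0) := by
      split_ifs with h1 h2 <;> first | rfl | (exfalso; tauto)
    rw [hcollapse]
    split_ifs <;> ring

theorem sieve_sum (hi n : Int) (_hn : 2 ≤ n) (hn2 : n ≤ hi) :
    (∑ d ∈ Finset.Icc 1 hi, if d ∣ n ∧ 2 * d ≤ n then d else 0) = spdZ n := by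
  unfold spdZ
  rw [← Finset.sum_subset (Finset.Icc_subset_Icc_right (by omega) :
      Finset.Icc 1 (n - 1) ⊆ Finset.Icc 1 hi) ?outside]
  · refine Finset.sum_congr rfl ?_
    intro d hdm
    rw [Finset.mem_Icc] at hdm
    by_cases hd : d ∣ n
    · obtain ⟨h2, hmul⟩ := dvd_div_ge_two hd (by omega) (by omega)
      rw [if_pos ⟨hd, by nlinarith⟩, if_pos hd]
    · rw [if_neg (by tauto), if_neg hd]
  case outside =>
    intro d hdm hdn
    rw [Finset.mem_Icc] at hdm
    rw [Finset.mem_Icc] at hdn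
    rw [if_neg]
    rintro ⟨-, h2⟩
    omega

theorem sig_getD (hi n : Int) (_h2 : 2 ≤ hi) (hn : 2 ≤ n) (hn2 : n ≤ hi) :
    ((PySem.List.pyRange 1 (hi + 1) 1).foldl
      (fun s d => (PySem.List.pyRange (2 * d) (hi + 1) d).foldl
        (fun s m => s.set m.toNat (s.getD m.toNat 0 + d)) s)
      (List.replicate (hi + 1).toNat 0)).getD n.toNat 0 = spdZ n := by
  rw [sieve_outer hi n hn hn2 _ _
    (fun d hd => ((PySem.List.mem_pyRange_iff_of_pos (by norm_num) d).mp hd).1)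
    (by rw [List.length_replicate])]
  rw [sum_map_pyRange _ hi (hi + 1 - 1).toNat 1 (by omega), sieve_sum hi n hn hn2]
  simp [List.getD]

-- ===== VERDICT (by name: the statement is the Claim_ definition above) =====
theorem count_perfect_in_range_spec : Claim_equal_count_perfect_in_range := by
  unfold Claim_equal_count_perfect_in_range
  intro low high _
  unfold Spec_count_perfect_in_range
  unfold count_perfect_in_range
  rw [cpirLoop_eq high (high + 1 - low).toNat low 0 rfl, zero_add]
  rw [count_perfect_in_range_alt]
  by_cases hh : high < 2 ∨ low > high
  · rw [if_pos hh]
    apply Finset.sum_eq_zero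
    intro m hm
    rw [Finset.mem_Icc] at hm
    rw [if_neg]
    rw [classify_zero_iff]
    rintro ⟨hc, -⟩
    omega
  · rw [if_neg hh]
    simp only []
    rw [foldl_ite_count _ high (high + 1 - max low 2).toNat (max low 2) 0 rfl, zero_add]
    rw [← Finset.sum_subset (Finset.Icc_subset_Icc (le_max_left low 2) le_rfl) ?outside]
    · refine Finset.sum_congr rfl ?_
      intro m hm
      rw [Finset.mem_Icc] at hm
      have hmm : 2 ≤ m := le_trans (le_max_right low 2) hm.1
      have hiff : (classify_number m = 0)
          ↔ (((PySem.List.pyRange 1 (high + 1) 1).foldl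
              (fun s d => (PySem.List.pyRange (2 * d) (high + 1) d).foldl
                (fun s m => s.set m.toNat (s.getD m.toNat 0 + d)) s)
              (List.replicate (high + 1).toNat 0)).getD m.toNat 0 = m) := by
        rw [sig_getD high m (by omega) hmm hm.2, classify_zero_iff]
        constructor
        · rintro ⟨-, h⟩; exact h
        · intro h; exact ⟨hmm, h⟩
      exact if_congr hiff rfl rfl
    case outside =>
      intro m hm1 hm2
      rw [Finset.mem_Icc] at hm1
      rw [Finset.mem_Icc] at hm2
      rw [if_neg]
      rw [classify_zero_iff]
      rintro ⟨hc, -⟩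
      omega
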